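-- pv_equiv track=rewrite | github.com/effat/csc-591 | Assign2/ass2.py | findids
-- ===== SOURCE A (Python) =====
-- def findids(list):         # function to find the student id and session id from each
--     matching = [s for s in list if "DDE (read-student-info" in s]
--     if len(matching)==0:
--         stid='missing'
--     else:
--         stid=matching[0].split()[3]
--     matching1 = [s for s in list if "DDE-POST (set-session-id" in s]
--     if len(matching1)==0:
--         sessid='missing'
--     else:
--         sessid=matching1[0].split()[3]
--     return stid,sessid
-- ===== SOURCE B (Python) =====
-- def findids(list):
--     stid = None
--     sessid = None
--     for s in list:
--         if stid is None and "DDE (read-student-info" in s: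
--             stid = s.split()[3]
--         if sessid is None and "DDE-POST (set-session-id" in s:
--             sessid = s.split()[3]
--         if stid is not None and sessid is not None:
--             break
--     return (stid if stid is not None else 'missing',
--             sessid if sessid is not None else 'missing')
-- ===== Notes on version B (the rewrite author's own statement) =====
-- stated objective: alternative
-- what changed: Two list comprehensions (two full scans building intermediate match lists) are replaced by a single early-exiting loop holding two optional accumulators and breaking once both ids are found.
import Mathlib
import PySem

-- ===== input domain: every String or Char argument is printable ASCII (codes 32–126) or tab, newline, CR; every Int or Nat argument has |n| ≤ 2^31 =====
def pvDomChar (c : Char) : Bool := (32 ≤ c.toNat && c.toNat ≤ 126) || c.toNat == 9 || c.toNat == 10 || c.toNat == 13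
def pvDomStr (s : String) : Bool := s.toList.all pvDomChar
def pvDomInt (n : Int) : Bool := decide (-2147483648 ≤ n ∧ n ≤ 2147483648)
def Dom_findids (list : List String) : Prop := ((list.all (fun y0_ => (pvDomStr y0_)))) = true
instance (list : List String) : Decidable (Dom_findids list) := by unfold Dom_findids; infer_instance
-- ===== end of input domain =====

-- B replaces A's two full comprehension scans by one early-exiting loop with two optional accumulators (alternative decomposition, not claimed faster).

-- ===== PORT A =====
-- A: two filters, each followed by a head-split-index step; s.split()[3] is PySem.List.pyGetD,
-- total only under Pre_findids (Python raises IndexError outside it).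
def findids (list : List String) : String × String :=
  let matching := list.filter (fun s => PySem.Str.isIn "DDE (read-student-info" s)
  let stid := if matching.length = 0 then "missing"
              else PySem.List.pyGetD (PySem.Str.split₀ (matching.headD "")) 3 ""
  let matching1 := list.filter (fun s => PySem.Str.isIn "DDE-POST (set-session-id" s)
  let sessid := if matching1.length = 0 then "missing"
                else PySem.List.pyGetD (PySem.Str.split₀ (matching1.headD "")) 3 ""
  (stid, sessid)

-- ===== PORT B =====
-- B: one pass, two Option accumulators, break once both are found.
def findids_altGo : List String → Option String → Option String → String × String
  | [], st, se => (st.getD "missing", se.getD "missing")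
  | s :: rest, st, se =>
    let st' := if st.isNone && PySem.Str.isIn "DDE (read-student-info" s
               then some (PySem.List.pyGetD (PySem.Str.split₀ s) 3 "") else st
    let se' := if se.isNone && PySem.Str.isIn "DDE-POST (set-session-id" s
               then some (PySem.List.pyGetD (PySem.Str.split₀ s) 3 "") else se
    if st'.isSome && se'.isSome then (st'.getD "missing", se'.getD "missing")
    else findids_altGo rest st' se'

def findids_alt (list : List String) : String × String :=
  findids_altGo list none none

-- ===== PRECONDITION & SPEC =====
-- Pre_: the first line containing each pattern (if any) splits into at least 4
-- whitespace-separated tokens; outside this, Python's matching[0].split()[3] raises IndexError.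
def Pre_findids (list : List String) : Prop :=
  (∀ s, list.find? (fun s => PySem.Str.isIn "DDE (read-student-info" s) = some s →
     4 ≤ (PySem.Str.split₀ s).length) ∧
  (∀ s, list.find? (fun s => PySem.Str.isIn "DDE-POST (set-session-id" s) = some s →
     4 ≤ (PySem.Str.split₀ s).length)
instance (list : List String) : Decidable (Pre_findids list) := by unfold Pre_findids; infer_instance

def pvWitness_findids : List String :=
  ["x 1 2 3 DDE (read-student-info tail", "noise", "a b c d DDE-POST (set-session-id"]

def Spec_findids (list : List String) (out : String × String) : Prop := out = findids_alt list
instance (list : List String) (out : String × String) : Decidable (Spec_findids list out) := by unfold Spec_findids; infer_instance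

-- ===== CLAIM (what is proved, stated in full; the proofs are below) =====
def Claim_equal_findids : Prop := ∀ (list : List String), Dom_findids list → Pre_findids list → Spec_findids list (findids list)

-- ===== LEMMAS AND PROOFS =====

-- first match of a pattern, as both programs compute it per component
def pvPick (pat : String) (l : List String) : String :=
  match l.find? (fun s => PySem.Chars.isIn pat.toList s.toList) with
  | none => "missing"
  | some s => PySem.List.pyGetD (PySem.Str.split₀ s) 3 ""

theorem pvPick_nil (pat : String) : pvPick pat [] = "missing" := rfl

theorem pvPick_cons (pat s : String) (rest : List String) :
    pvPick pat (s :: rest) =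
      if PySem.Chars.isIn pat.toList s.toList
      then PySem.List.pyGetD (PySem.Str.split₀ s) 3 "" else pvPick pat rest := by
  simp only [pvPick, List.find?_cons]
  cases h : PySem.Chars.isIn pat.toList s.toList <;> simp

theorem pvPickA_eq (pat : String) (l : List String) :
    (if (l.filter (fun s => PySem.Str.isIn pat s)).length = 0 then "missing"
     else PySem.List.pyGetD (PySem.Str.split₀ ((l.filter (fun s => PySem.Str.isIn pat s)).headD "")) 3 "")
    = pvPick pat l := by
  have hfun : (fun s : String => PySem.Str.isIn pat s)
      = (fun s : String => PySem.Chars.isIn pat.toList s.toList) :=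
    funext fun s => by simp [PySem.Str.isIn]
  rw [hfun]
  rcases h : l.find? (fun s : String => PySem.Chars.isIn pat.toList s.toList) with _ | s
  · have hf : l.filter (fun s : String => PySem.Chars.isIn pat.toList s.toList) = [] :=
      List.filter_eq_nil_iff.mpr (by
        intro a ha
        simpa using List.find?_eq_none.mp h a ha)
    simp [pvPick, h, hf]
  · have hne : l.filter (fun s : String => PySem.Chars.isIn pat.toList s.toList) ≠ [] :=
      List.ne_nil_of_mem (List.mem_filter.mpr ⟨List.mem_of_find?_eq_some h,
        List.find?_some (p := fun s : String => PySem.Chars.isIn pat.toList s.toList) h⟩)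
    simp [pvPick, h, List.length_eq_zero_iff, hne]

theorem pvA_eq (l : List String) :
    findids l = (pvPick "DDE (read-student-info" l, pvPick "DDE-POST (set-session-id" l) := by
  simp only [findids]
  rw [pvPickA_eq, pvPickA_eq]

theorem pvGo_eq (l : List String) (st se : Option String) :
    findids_altGo l st se =
      (st.getD (pvPick "DDE (read-student-info" l), se.getD (pvPick "DDE-POST (set-session-id" l)) := by
  induction l generalizing st se with
  | nil =>
    cases st <;> cases se <;> simp [findids_altGo, pvPick_nil]
  | cons s rest ih =>
    cases st <;> cases se <;>
      by_cases h1 : PySem.Chars.isIn "DDE (read-student-info".toList s.toList = true <;>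
      by_cases h2 : PySem.Chars.isIn "DDE-POST (set-session-id".toList s.toList = true <;>
      simp at h1 h2 <;>
      simp [findids_altGo, h1, h2, pvPick_cons, ih]

-- ===== VERDICT (by name: the statement is the Claim_ definition above) =====
theorem findids_spec : Claim_equal_findids := by
  intro l _ _
  unfold Spec_findids findids_alt
  rw [pvGo_eq, pvA_eq]
  simp
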